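-- pv_equiv track=rewrite | github.com/JohnNDvorak/przz-extension | src/psi_combinatorial.py | psi_d1_configs
-- ===== SOURCE A (Python) =====
-- from collections import defaultdict
-- from math import comb, factorial
-- from typing import Dict, Tuple
--
-- def psi_d1_configs(ell: int, ellbar: int) -> Dict[Tuple[int, int, int, int], int]:
--     """
--     Expand the Ψ formula for (ℓ, ℓ̄) pair with d=1.
--
--     Ψ_{ℓ,ℓ̄}(A,B,C,D) = Σ_{p=0}^{min(ℓ,ℓ̄)} C(ℓ,p)C(ℓ̄,p)p! (D - C²)^p (A - C)^{ℓ-p} (B - C)^{ℓ̄-p}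
--
--     Returns dict mapping (k1, k2, l1, m1) -> integer coefficient
--     where the monomial is: C^{k1} × D^{k2} × A^{l1} × B^{m1}
--
--     Parameters:
--         ell: First index ℓ (1, 2, or 3 for K=3)
--         ellbar: Second index ℓ̄ (1, 2, or 3 for K=3)
--
--     Returns:
--         Dictionary from (k1, k2, l1, m1) -> coefficient
--         k1 = power of C
--         k2 = power of D
--         l1 = power of A
--         m1 = power of B
--     """
--     coeffs: Dict[Tuple[int, int, int, int], int] = defaultdict(int)
--
--     for p in range(0, min(ell, ellbar) + 1):
--         # Prefactor: C(ℓ,p) × C(ℓ̄,p) × p!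
--         pref = comb(ell, p) * comb(ellbar, p) * factorial(p)
--
--         # Expand (D - C²)^p using binomial theorem
--         # (D - C²)^p = Σ_{j=0}^p C(p,j) D^j (-C²)^{p-j}
--         #            = Σ_{j=0}^p C(p,j) (-1)^{p-j} D^j C^{2(p-j)}
--         for j in range(0, p + 1):
--             k2 = j  # power of D
--             c_pow_from_g2 = 2 * (p - j)  # power of C from (D-C²)^p term
--             coeff_g2 = comb(p, j) * ((-1) ** (p - j))
--
--             # Expand (A - C)^{ℓ-p} using binomial theorem
--             # (A - C)^{ℓ-p} = Σ_{a=0}^{ℓ-p} C(ℓ-p,a) A^a (-C)^{ℓ-p-a}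
--             for a in range(0, ell - p + 1):
--                 l1 = a  # power of A
--                 c_pow_from_A = (ell - p - a)  # power of C from (A-C)^{ℓ-p} term
--                 coeff_A = comb(ell - p, a) * ((-1) ** (ell - p - a))
--
--                 # Expand (B - C)^{ℓ̄-p} using binomial theorem
--                 # (B - C)^{ℓ̄-p} = Σ_{b=0}^{ℓ̄-p} C(ℓ̄-p,b) B^b (-C)^{ℓ̄-p-b}
--                 for b in range(0, ellbar - p + 1):
--                     m1 = b  # power of B
--                     c_pow_from_B = (ellbar - p - b)  # power of C from (B-C)^{ℓ̄-p} term
--                     coeff_B = comb(ellbar - p, b) * ((-1) ** (ellbar - p - b))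
--
--                     # Total power of C
--                     k1 = c_pow_from_g2 + c_pow_from_A + c_pow_from_B
--
--                     # Accumulate coefficient
--                     coeffs[(k1, k2, l1, m1)] += pref * coeff_g2 * coeff_A * coeff_B
--
--     # Remove zero coefficients
--     return {k: v for k, v in coeffs.items() if v != 0}
-- ===== SOURCE B (Python) =====
-- from math import comb, factorial
-- from typing import Dict, Tuple
--
-- def psi_d1_configs(ell: int, ellbar: int) -> Dict[Tuple[int, int, int, int], int]:
--     """Key-major re-implementation: the C-power is determined by the other three
--     exponents (k1 = ell+ellbar-2*k2-l1-m1), so enumerate each monomial key once and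
--     compute its coefficient as a direct sum over p -- no accumulator dict needed."""
--     out: Dict[Tuple[int, int, int, int], int] = {}
--     for j in range(0, min(ell, ellbar) + 1):          # power of D
--         for a in range(0, ell - j + 1):               # power of A
--             for b in range(0, ellbar - j + 1):        # power of B
--                 s = sum(
--                     comb(ell, p) * comb(ellbar, p) * factorial(p)
--                     * comb(p, j) * (-1) ** (p - j)
--                     * comb(ell - p, a) * (-1) ** (ell - p - a)
--                     * comb(ellbar - p, b) * (-1) ** (ellbar - p - b)
--                     for p in range(j, min(ell - a, ellbar - b) + 1)
--                 )
--                 if s != 0: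
--                     out[(ell + ellbar - 2 * j - a - b, j, a, b)] = s
--     return out
-- ===== Notes on version B (the rewrite author's own statement) =====
-- stated objective: simpler
-- what changed: Instead of a 4-level loop accumulating monomials into a defaultdict and filtering zeros at the end, B enumerates each monomial key (k2,l1,m1) once (the C-power is determined: k1 = ell+ellbar-2*k2-l1-m1, so keys never collide across p) and computes its coefficient as a direct sum over p, writing nonzero entries straight into the result dict.
import Mathlib
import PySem

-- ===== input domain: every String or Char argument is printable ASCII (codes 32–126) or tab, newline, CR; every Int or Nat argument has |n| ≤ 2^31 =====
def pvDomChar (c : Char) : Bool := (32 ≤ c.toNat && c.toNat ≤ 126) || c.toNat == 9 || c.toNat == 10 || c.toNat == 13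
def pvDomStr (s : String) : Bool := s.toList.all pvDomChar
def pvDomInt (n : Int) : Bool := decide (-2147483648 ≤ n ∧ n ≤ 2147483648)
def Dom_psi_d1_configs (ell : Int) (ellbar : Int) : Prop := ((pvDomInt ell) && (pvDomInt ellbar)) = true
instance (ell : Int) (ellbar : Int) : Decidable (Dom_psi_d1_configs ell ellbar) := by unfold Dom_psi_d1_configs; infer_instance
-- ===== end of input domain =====

-- B replaces A's defaultdict accumulation over a 4-level loop by a key-major enumeration:
-- the C-power of every monomial is determined by the other three exponents, so each key is
-- produced once with its coefficient computed as a direct sum over p (objective: simpler).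

-- math.comb / math.factorial; exact on the nonnegative in-range arguments both programs pass
def pyComb (n k : Int) : Int := (n.toNat.choose k.toNat : Int)
def pyFact (n : Int) : Int := (n.toNat.factorial : Int)

-- ===== PORT A =====
def psi_d1_configs (ell : Int) (ellbar : Int) : List (Int × Int × Int × Int × Int) :=
  let coeffs : PySem.Dict (Int × Int × Int × Int) Int :=
    (PySem.List.pyRange 0 (min ell ellbar + 1)).foldl (fun d p =>
      let pref := pyComb ell p * pyComb ellbar p * pyFact p
      (PySem.List.pyRange 0 (p + 1)).foldl (fun d j =>
        let coeff_g2 := pyComb p j * (-1) ^ (p - j).toNat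
        (PySem.List.pyRange 0 (ell - p + 1)).foldl (fun d a =>
          let coeff_A := pyComb (ell - p) a * (-1) ^ (ell - p - a).toNat
          (PySem.List.pyRange 0 (ellbar - p + 1)).foldl (fun d b =>
            let coeff_B := pyComb (ellbar - p) b * (-1) ^ (ellbar - p - b).toNat
            let k1 := 2 * (p - j) + (ell - p - a) + (ellbar - p - b)
            d.modify (k1, j, a, b) 0 (· + pref * coeff_g2 * coeff_A * coeff_B)) d) d) d)
      PySem.Dict.empty
  (coeffs.items.filter (fun kv => kv.2 != 0)).map
    (fun kv => (kv.1.1, kv.1.2.1, kv.1.2.2.1, kv.1.2.2.2, kv.2))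

-- ===== PORT B =====
def psi_d1_configs_alt (ell : Int) (ellbar : Int) : List (Int × Int × Int × Int × Int) :=
  (PySem.List.pyRange 0 (min ell ellbar + 1)).flatMap (fun j =>
    (PySem.List.pyRange 0 (ell - j + 1)).flatMap (fun a =>
      (PySem.List.pyRange 0 (ellbar - j + 1)).flatMap (fun b =>
        let s : Int :=
          ((PySem.List.pyRange j (min (ell - a) (ellbar - b) + 1)).map (fun p =>
            pyComb ell p * pyComb ellbar p * pyFact p
              * pyComb p j * (-1) ^ (p - j).toNat
              * pyComb (ell - p) a * (-1) ^ (ell - p - a).toNat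
              * pyComb (ellbar - p) b * (-1) ^ (ellbar - p - b).toNat)).sum
        if s != 0 then [(ell + ellbar - 2 * j - a - b, j, a, b, s)] else [])))

-- ===== PRECONDITION & SPEC =====
def Spec_psi_d1_configs (ell : Int) (ellbar : Int) (out : List (Int × Int × Int × Int × Int)) : Prop := out = psi_d1_configs_alt ell ellbar
instance (ell : Int) (ellbar : Int) (out : List (Int × Int × Int × Int × Int)) : Decidable (Spec_psi_d1_configs ell ellbar out) := by unfold Spec_psi_d1_configs; infer_instance

-- ===== CLAIM (what is proved, stated in full; the proofs are below) =====
def Claim_equal_psi_d1_configs : Prop := ∀ (ell : Int) (ellbar : Int), Dom_psi_d1_configs ell ellbar → Spec_psi_d1_configs ell ellbar (psi_d1_configs ell ellbar)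

-- ===== LEMMAS AND PROOFS =====

-- B's per-term summand (B's grouping of the factors)
def pvTerm (ell ellbar j a b p : Int) : Int :=
  pyComb ell p * pyComb ellbar p * pyFact p
    * pyComb p j * (-1) ^ (p - j).toNat
    * pyComb (ell - p) a * (-1) ^ (ell - p - a).toNat
    * pyComb (ellbar - p) b * (-1) ^ (ellbar - p - b).toNat

-- A's per-term contribution value (A's grouping of the factors)
def pvVal (ell ellbar p j a b : Int) : Int :=
  pyComb ell p * pyComb ellbar p * pyFact p * (pyComb p j * (-1) ^ (p - j).toNat)
    * (pyComb (ell - p) a * (-1) ^ (ell - p - a).toNat)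
    * (pyComb (ellbar - p) b * (-1) ^ (ellbar - p - b).toNat)

-- the flat list of (key, contribution) pairs A's four nested loops run through
def pvQuads (ell ellbar : Int) : List ((Int × Int × Int × Int) × Int) :=
  (PySem.List.pyRange 0 (min ell ellbar + 1)).flatMap (fun p =>
    (PySem.List.pyRange 0 (p + 1)).flatMap (fun j =>
      (PySem.List.pyRange 0 (ell - p + 1)).flatMap (fun a =>
        (PySem.List.pyRange 0 (ellbar - p + 1)).map (fun b =>
          ((2 * (p - j) + (ell - p - a) + (ellbar - p - b), j, a, b), pvVal ell ellbar p j a b)))))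

def pvStep (d : PySem.Dict (Int × Int × Int × Int) Int) (kv : (Int × Int × Int × Int) × Int) :
    PySem.Dict (Int × Int × Int × Int) Int :=
  d.modify kv.1 0 (· + kv.2)

-- keys contributed by A's pass p, in order
def pvBlockK (ell ellbar p : Int) : List (Int × Int × Int × Int) :=
  (PySem.List.pyRange 0 (p + 1)).flatMap (fun j =>
    (PySem.List.pyRange 0 (ell - p + 1)).flatMap (fun a =>
      (PySem.List.pyRange 0 (ellbar - p + 1)).map (fun b =>
        (2 * (p - j) + (ell - p - a) + (ellbar - p - b), j, a, b))))

-- all keys with D-power j, in order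
def pvFullK (ell ellbar j : Int) : List (Int × Int × Int × Int) :=
  (PySem.List.pyRange 0 (ell - j + 1)).flatMap (fun a =>
    (PySem.List.pyRange 0 (ellbar - j + 1)).map (fun b =>
      (ell + ellbar - 2 * j - a - b, j, a, b)))

-- B's coefficient for key (·, j, a, b)
def pvS (ell ellbar j a b : Int) : Int :=
  ((PySem.List.pyRange j (min (ell - a) (ellbar - b) + 1)).map (pvTerm ell ellbar j a b)).sum


-- generic sum/filter helpers ------------------------------------------------

theorem pv_update_of_subset {α : Type} [BEq α] [LawfulBEq α] (s : PySem.Set α) (xs : List α)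
    (h : ∀ x ∈ xs, x ∈ s) : s.update xs = s := by
  rw [PySem.Set.update_eq_append_filter]
  have hnil : (PySem.Set.ofList xs).filter (fun y => !PySem.Set.contains s y) = [] := by
    apply List.filter_eq_nil_iff.mpr
    intro y hy
    have hm : y ∈ s := h y ((PySem.Set.mem_ofList xs y).mp hy)
    simpa using hm
  rw [hnil, List.append_nil]

theorem pv_sum_single (x0 : Int) (g : Int → Int) (xs : List Int) (hnd : xs.Nodup)
    (hz : ∀ x ∈ xs, x ≠ x0 → g x = 0) :
    (xs.map g).sum = if x0 ∈ xs then g x0 else 0 := by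
  induction xs with
  | nil => simp
  | cons y ys ih =>
    simp only [List.map_cons, List.sum_cons]
    by_cases hy : y = x0
    · subst hy
      have hys : (ys.map g).sum = 0 := by
        apply List.sum_eq_zero
        intro u hu
        obtain ⟨x, hx, rfl⟩ := List.mem_map.mp hu
        exact hz x (List.mem_cons_of_mem _ hx) (fun h => (List.nodup_cons.mp hnd).1 (h ▸ hx))
      simp [hys]
    · have h0 : g y = 0 := hz y (List.mem_cons_self) hy
      rw [h0, ih (List.nodup_cons.mp hnd).2 (fun x hx => hz x (List.mem_cons_of_mem _ hx))]
      rw [zero_add]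
      have hiff : (x0 ∈ y :: ys) ↔ (x0 ∈ ys) := by
        simp only [List.mem_cons]
        exact ⟨fun h => h.elim (fun h' => absurd h'.symm hy) id, Or.inr⟩
      by_cases hm : x0 ∈ ys
      · rw [if_pos hm, if_pos (hiff.mpr hm)]
      · rw [if_neg hm, if_neg (fun h => hm (hiff.mp h))]

def pvF (t : Int × Int × Int × Int) (L : List ((Int × Int × Int × Int) × Int)) : Int :=
  ((L.filter (fun kv => kv.1 == t)).map (·.2)).sum

theorem pvF_append (t : Int × Int × Int × Int) (xs ys : List ((Int × Int × Int × Int) × Int)) :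
    pvF t (xs ++ ys) = pvF t xs + pvF t ys := by
  simp [pvF, List.filter_append]

theorem pvF_flatMap {α : Type} (t : Int × Int × Int × Int) (g : α → List ((Int × Int × Int × Int) × Int))
    (l : List α) : pvF t (l.flatMap g) = (l.map (fun x => pvF t (g x))).sum := by
  induction l with
  | nil => simp [pvF]
  | cons x l ih => simp [List.flatMap_cons, pvF_append, ih]

theorem pvF_map_range (t : Int × Int × Int × Int) (key : Int → Int × Int × Int × Int)
    (v : Int → Int) (xs : List Int) (x0 : Int) (hk : ∀ x, (key x == t) = (x == x0))
    (hnd : xs.Nodup) :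
    pvF t (xs.map (fun x => (key x, v x))) = if x0 ∈ xs then v x0 else 0 := by
  unfold pvF
  rw [List.filter_map]
  have hfc : xs.filter ((fun kv => kv.1 == t) ∘ (fun x => (key x, v x))) = xs.filter (fun x => x == x0) := by
    apply List.filter_congr
    intro x _
    simpa using hk x
  rw [hfc, List.filter_beq, hnd.count]
  by_cases hx : x0 ∈ xs <;> simp [hx]

theorem pvF_map_zero (t : Int × Int × Int × Int) (key : Int → Int × Int × Int × Int)
    (v : Int → Int) (xs : List Int) (hk : ∀ x, (key x == t) = false) :
    pvF t (xs.map (fun x => (key x, v x))) = 0 := by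
  unfold pvF
  have : (xs.map (fun x => (key x, v x))).filter (fun kv => kv.1 == t) = [] := by
    apply List.filter_eq_nil_iff.mpr
    intro kv hkv
    obtain ⟨x, _, rfl⟩ := List.mem_map.mp hkv
    simp [hk x]
  simp [this]

-- fullK is duplicate-free ----------------------------------------------------

theorem pv_nodup_fullK (ell ellbar j : Int) : (pvFullK ell ellbar j).Nodup := by
  unfold pvFullK
  rw [List.nodup_flatMap]
  constructor
  · intro a _
    apply List.Nodup.map _ (PySem.List.nodup_pyRange_one _ _)
    intro b1 b2 h
    simpa using congrArg (fun x => x.2.2.2) h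
  · have hp : (PySem.List.pyRange 0 (ell - j + 1)).Pairwise (· ≠ ·) :=
      PySem.List.nodup_pyRange_one _ _
    apply hp.imp
    intro a1 a2 hne x hx1 hx2
    obtain ⟨b1, _, rfl⟩ := List.mem_map.mp hx1
    obtain ⟨b2, _, h⟩ := List.mem_map.mp hx2
    have h21 := congrArg (fun x => x.2.2.1) h
    simp at h21
    exact hne h21.symm

-- value accumulated at a key = sum of the matching contributions
theorem pv_getD_foldl (L : List ((Int × Int × Int × Int) × Int))
    (d : PySem.Dict (Int × Int × Int × Int) Int) (k : Int × Int × Int × Int) :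
    (L.foldl pvStep d).getD k 0 = d.getD k 0 + ((L.filter (fun kv => kv.1 == k)).map (·.2)).sum := by
  induction L generalizing d with
  | nil => simp
  | cons kv L ih =>
    rw [List.foldl_cons, ih]
    simp only [pvStep, List.filter_cons]
    by_cases hk : kv.1 = k
    · have hb : (kv.1 == k) = true := beq_iff_eq.mpr hk
      simp [hk]
      ring
    · have hb : (kv.1 == k) = false := by simpa using hk
      have hne : ¬ (k = kv.1) := fun h => hk h.symm
      simp [PySem.Dict.getD_modify, hb, hne]

theorem pv_A_eq_fold (ell ellbar : Int) :
    psi_d1_configs ell ellbar =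
      (((pvQuads ell ellbar).foldl pvStep PySem.Dict.empty).items.filter (fun kv => kv.2 != 0)).map
        (fun kv => (kv.1.1, kv.1.2.1, kv.1.2.2.1, kv.1.2.2.2, kv.2)) := by
  unfold psi_d1_configs pvQuads pvVal pvStep
  simp only [List.foldl_flatMap, List.foldl_map]

theorem pv_keys_char (ell ellbar : Int) :
    ((pvQuads ell ellbar).foldl pvStep PySem.Dict.empty).keys =
      PySem.Set.ofList ((pvQuads ell ellbar).map (·.1)) := by
  have h : (pvQuads ell ellbar).foldl pvStep PySem.Dict.empty
      = (pvQuads ell ellbar).foldl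
          (fun d x => d.modify ((fun (kv : (Int × Int × Int × Int) × Int) => kv.1) x) 0
            ((fun (_ : PySem.Dict (Int × Int × Int × Int) Int)
                  (kv : (Int × Int × Int × Int) × Int) (v : Int) => v + kv.2) d x))
          PySem.Dict.empty := rfl
  rw [h, PySem.Dict.keys_foldl_modify_key]
  simp [PySem.Set.update_nil_left]

theorem pv_nodup_keys (ell ellbar : Int) :
    ((pvQuads ell ellbar).foldl pvStep PySem.Dict.empty).keys.Nodup := by
  have h : (pvQuads ell ellbar).foldl pvStep PySem.Dict.empty
      = (pvQuads ell ellbar).foldl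
          (fun d x => d.modify ((fun (kv : (Int × Int × Int × Int) × Int) => kv.1) x) 0
            ((fun (_ : PySem.Dict (Int × Int × Int × Int) Int)
                  (kv : (Int × Int × Int × Int) × Int) (v : Int) => v + kv.2) d x))
          PySem.Dict.empty := rfl
  rw [h]
  exact PySem.Dict.nodup_keys_foldl_modify_key _ _ _ _ _ PySem.Dict.nodup_keys_empty

theorem pv_ofList_keys (ell ellbar : Int) (q : Int) (h0 : 0 ≤ q) (hq : q ≤ min ell ellbar + 1) :
    PySem.Set.ofList ((PySem.List.pyRange 0 q).flatMap (pvBlockK ell ellbar)) =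
      (PySem.List.pyRange 0 q).flatMap (pvFullK ell ellbar) := by
  induction q, h0 using Int.le_induction with
  | base => simp [PySem.List.pyRange_one_eq_nil (le_refl 0), PySem.Set.ofList_nil]
  | succ q h0 ih =>
    have hqm : q ≤ min ell ellbar + 1 := by omega
    rw [PySem.List.pyRange_one_succ_right h0, List.flatMap_append]
    simp only [List.flatMap_cons, List.flatMap_nil, List.append_nil]
    rw [PySem.Set.ofList_append, ih hqm]
    -- split the pass-q keys into the already-present ones (j < q) and the fresh ones (j = q)
    have hsplit : pvBlockK ell ellbar q =
        ((PySem.List.pyRange 0 q).flatMap (fun j =>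
          (PySem.List.pyRange 0 (ell - q + 1)).flatMap (fun a =>
            (PySem.List.pyRange 0 (ellbar - q + 1)).map (fun b =>
              (2 * (q - j) + (ell - q - a) + (ellbar - q - b), j, a, b)))))
        ++ pvFullK ell ellbar q := by
      unfold pvBlockK
      rw [PySem.List.pyRange_one_succ_right h0, List.flatMap_append]
      simp only [List.flatMap_cons, List.flatMap_nil, List.append_nil]
      congr 1
      unfold pvFullK
      apply List.flatMap_congr
      intro a _
      apply List.map_congr_left
      intro b _
      have h2 : 2 * (q - q) + (ell - q - a) + (ellbar - q - b) = ell + ellbar - 2 * q - a - b := by omega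
      rw [h2]
    rw [hsplit, PySem.Set.update_append]
    have hold : PySem.Set.update ((PySem.List.pyRange 0 q).flatMap (pvFullK ell ellbar))
        ((PySem.List.pyRange 0 q).flatMap (fun j =>
          (PySem.List.pyRange 0 (ell - q + 1)).flatMap (fun a =>
            (PySem.List.pyRange 0 (ellbar - q + 1)).map (fun b =>
              (2 * (q - j) + (ell - q - a) + (ellbar - q - b), j, a, b)))))
        = (PySem.List.pyRange 0 q).flatMap (pvFullK ell ellbar) := by
      apply pv_update_of_subset
      intro x hx
      simp only [List.mem_flatMap, List.mem_map, PySem.List.mem_pyRange_one] at hx ⊢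
      obtain ⟨j, hj, a, ha, b, hb, rfl⟩ := hx
      refine ⟨j, hj, ?_⟩
      unfold pvFullK
      simp only [List.mem_flatMap, List.mem_map, PySem.List.mem_pyRange_one]
      refine ⟨a, by omega, b, by omega, ?_⟩
      have : ell + ellbar - 2 * j - a - b = 2 * (q - j) + (ell - q - a) + (ellbar - q - b) := by omega
      rw [this]
    rw [hold]
    have hdisj : ∀ x ∈ pvFullK ell ellbar q,
        x ∉ (PySem.List.pyRange 0 q).flatMap (pvFullK ell ellbar) := by
      intro x hx
      unfold pvFullK at hx
      simp only [List.mem_flatMap, List.mem_map, PySem.List.mem_pyRange_one] at hx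
      obtain ⟨a, ha, b, hb, rfl⟩ := hx
      intro hmem
      simp only [List.mem_flatMap, PySem.List.mem_pyRange_one] at hmem
      obtain ⟨j, hj, hjmem⟩ := hmem
      unfold pvFullK at hjmem
      simp only [List.mem_flatMap, List.mem_map, PySem.List.mem_pyRange_one] at hjmem
      obtain ⟨a', _, b', _, h⟩ := hjmem
      have h21 := congrArg (fun x => x.2.1) h
      simp at h21
      omega
    rw [PySem.Set.update_eq_append_of_disjoint _ _ (pv_nodup_fullK ell ellbar q) hdisj]
    simp [List.flatMap_append]

theorem pv_sum_char (ell ellbar j a b : Int) (hj : 0 ≤ j) (hjm : j ≤ min ell ellbar)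
    (ha : 0 ≤ a) (hae : a ≤ ell - j) (hb : 0 ≤ b) (hbe : b ≤ ellbar - j) :
    pvF (ell + ellbar - 2 * j - a - b, j, a, b) (pvQuads ell ellbar)
      = pvS ell ellbar j a b := by
  have hkey : ∀ p j' a' b' : Int,
      (((2 * (p - j') + (ell - p - a') + (ellbar - p - b'), j', a', b') : Int × Int × Int × Int)
        == (ell + ellbar - 2 * j - a - b, j, a, b))
      = (decide (j' = j) && decide (a' = a) && decide (b' = b)) := by
    intro p j' a' b'
    by_cases h1 : j' = j <;> by_cases h2 : a' = a <;> by_cases h3 : b' = b <;>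
      simp [h1, h2, h3, Prod.ext_iff] <;> omega
  have hin3 : ∀ p j' a' : Int,
      pvF (ell + ellbar - 2 * j - a - b, j, a, b)
        ((PySem.List.pyRange 0 (ellbar - p + 1)).map (fun b' =>
          ((2 * (p - j') + (ell - p - a') + (ellbar - p - b'), j', a', b'),
            pvVal ell ellbar p j' a' b')))
      = if j' = j ∧ a' = a ∧ b ≤ ellbar - p then pvVal ell ellbar p j' a' b else 0 := by
    intro p j' a'
    by_cases h1 : j' = j
    · by_cases h2 : a' = a
      · rw [pvF_map_range _ _ _ _ b
            (fun b' => by rw [hkey]; by_cases hbb : b' = b <;> simp [h1, h2, hbb])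
            (PySem.List.nodup_pyRange_one _ _)]
        by_cases h3 : b ≤ ellbar - p
        · rw [if_pos (by rw [PySem.List.mem_pyRange_one]; omega), if_pos ⟨h1, h2, h3⟩]
        · rw [if_neg (by rw [PySem.List.mem_pyRange_one]; omega), if_neg (by tauto)]
      · rw [pvF_map_zero _ _ _ _ (fun b' => by rw [hkey]; simp [h2]), if_neg (by tauto)]
    · rw [pvF_map_zero _ _ _ _ (fun b' => by rw [hkey]; simp [h1]), if_neg (by tauto)]
  have hin2 : ∀ p j' : Int,
      pvF (ell + ellbar - 2 * j - a - b, j, a, b)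
        ((PySem.List.pyRange 0 (ell - p + 1)).flatMap (fun a' =>
          (PySem.List.pyRange 0 (ellbar - p + 1)).map (fun b' =>
            ((2 * (p - j') + (ell - p - a') + (ellbar - p - b'), j', a', b'),
              pvVal ell ellbar p j' a' b'))))
      = if j' = j ∧ a ≤ ell - p ∧ b ≤ ellbar - p then pvVal ell ellbar p j' a b else 0 := by
    intro p j'
    rw [pvF_flatMap, pv_sum_single a _ _ (PySem.List.nodup_pyRange_one _ _)
      (fun a' _ hne => by rw [hin3]; exact if_neg (fun h => hne h.2.1))]
    by_cases hap : a ≤ ell - p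
    · rw [if_pos (by rw [PySem.List.mem_pyRange_one]; omega), hin3]
      by_cases h1 : j' = j <;> by_cases h3 : b ≤ ellbar - p <;> simp [h1, h3, hap]
    · rw [if_neg (by rw [PySem.List.mem_pyRange_one]; omega), if_neg (fun h => hap h.2.1)]
  have hin1 : ∀ p : Int, 0 ≤ p →
      pvF (ell + ellbar - 2 * j - a - b, j, a, b)
        ((PySem.List.pyRange 0 (p + 1)).flatMap (fun j' =>
          (PySem.List.pyRange 0 (ell - p + 1)).flatMap (fun a' =>
            (PySem.List.pyRange 0 (ellbar - p + 1)).map (fun b' =>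
              ((2 * (p - j') + (ell - p - a') + (ellbar - p - b'), j', a', b'),
                pvVal ell ellbar p j' a' b')))))
      = if j ≤ p ∧ a ≤ ell - p ∧ b ≤ ellbar - p then pvVal ell ellbar p j a b else 0 := by
    intro p hp
    rw [pvF_flatMap, pv_sum_single j _ _ (PySem.List.nodup_pyRange_one _ _)
      (fun j' _ hne => by rw [hin2]; exact if_neg (fun h => hne h.1))]
    by_cases hjp : j ≤ p
    · rw [if_pos (by rw [PySem.List.mem_pyRange_one]; omega), hin2]
      by_cases h2 : a ≤ ell - p <;> by_cases h3 : b ≤ ellbar - p <;> simp [h2, h3, hjp]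
    · rw [if_neg (by rw [PySem.List.mem_pyRange_one]; omega), if_neg (fun h => hjp h.1)]
  unfold pvQuads
  rw [pvF_flatMap,
    List.map_congr_left (fun p hp => hin1 p (by
      rw [PySem.List.mem_pyRange_one] at hp; omega))]
  have hsplit : PySem.List.pyRange 0 (min ell ellbar + 1)
      = PySem.List.pyRange 0 j ++ (PySem.List.pyRange j (min (ell - a) (ellbar - b) + 1)
          ++ PySem.List.pyRange (min (ell - a) (ellbar - b) + 1) (min ell ellbar + 1)) := by
    rw [← PySem.List.pyRange_one_append j (min (ell - a) (ellbar - b) + 1) (min ell ellbar + 1)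
      (by omega) (by omega)]
    exact PySem.List.pyRange_one_append 0 j (min ell ellbar + 1) hj (by omega)
  rw [hsplit, List.map_append, List.map_append, List.sum_append, List.sum_append]
  have hz1 : ((PySem.List.pyRange 0 j).map (fun p =>
      if j ≤ p ∧ a ≤ ell - p ∧ b ≤ ellbar - p then pvVal ell ellbar p j a b else 0)).sum = 0 := by
    apply List.sum_eq_zero
    intro x hx
    obtain ⟨p, hp, rfl⟩ := List.mem_map.mp hx
    rw [PySem.List.mem_pyRange_one] at hp
    exact if_neg (fun h => by omega)
  have hz3 : ((PySem.List.pyRange (min (ell - a) (ellbar - b) + 1) (min ell ellbar + 1)).map (fun p =>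
      if j ≤ p ∧ a ≤ ell - p ∧ b ≤ ellbar - p then pvVal ell ellbar p j a b else 0)).sum = 0 := by
    apply List.sum_eq_zero
    intro x hx
    obtain ⟨p, hp, rfl⟩ := List.mem_map.mp hx
    rw [PySem.List.mem_pyRange_one] at hp
    exact if_neg (fun h => by omega)
  rw [hz1, hz3, zero_add, add_zero]
  unfold pvS
  refine congrArg List.sum ?_
  apply List.map_congr_left
  intro p hp
  rw [PySem.List.mem_pyRange_one] at hp
  rw [if_pos (by omega)]
  unfold pvVal pvTerm
  ring

-- ===== VERDICT (by name: the statement is the Claim_ definition above) =====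
-- filter-then-rebuild of an association list over distinct keys, as a flatMap
theorem pv_filter_map_flat (l : List (Int × Int × Int × Int)) (g : (Int × Int × Int × Int) → Int) :
    ((l.map (fun k => (k, g k))).filter (fun kv => kv.2 != 0)).map
        (fun kv => (kv.1.1, kv.1.2.1, kv.1.2.2.1, kv.1.2.2.2, kv.2))
      = l.flatMap (fun k => if g k != 0 then [(k.1, k.2.1, k.2.2.1, k.2.2.2, g k)] else []) := by
  induction l with
  | nil => simp
  | cons k l ih =>
    simp only [List.map_cons, List.filter_cons, List.flatMap_cons]
    by_cases h : g k = 0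
    · simp [h, ih]
    · simp [h, ih]

theorem psi_d1_configs_spec : Claim_equal_psi_d1_configs := by
  intro ell ellbar _
  show psi_d1_configs ell ellbar = psi_d1_configs_alt ell ellbar
  by_cases hm : 0 ≤ min ell ellbar + 1
  · rw [pv_A_eq_fold]
    have hmapfst : (pvQuads ell ellbar).map (·.1)
        = (PySem.List.pyRange 0 (min ell ellbar + 1)).flatMap (pvBlockK ell ellbar) := by
      unfold pvQuads pvBlockK
      simp [List.map_flatMap, List.map_map, Function.comp_def]
    have hkeys2 : ((pvQuads ell ellbar).foldl pvStep PySem.Dict.empty).keys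
        = (PySem.List.pyRange 0 (min ell ellbar + 1)).flatMap (pvFullK ell ellbar) := by
      rw [pv_keys_char, hmapfst, pv_ofList_keys ell ellbar _ hm (le_refl _)]
    rw [PySem.Dict.items_eq_map_keys _ (pv_nodup_keys ell ellbar) 0, hkeys2]
    have hg : ∀ k : Int × Int × Int × Int,
        ((pvQuads ell ellbar).foldl pvStep PySem.Dict.empty).getD k 0 = pvF k (pvQuads ell ellbar) := by
      intro k
      rw [pv_getD_foldl, PySem.Dict.getD_empty, zero_add]
      rfl
    rw [List.map_congr_left
      (g := fun k => (k, pvF k (pvQuads ell ellbar))) (fun k _ => by rw [hg k])]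
    rw [pv_filter_map_flat, List.flatMap_assoc]
    unfold psi_d1_configs_alt
    apply List.flatMap_congr
    intro j hj
    rw [PySem.List.mem_pyRange_one] at hj
    unfold pvFullK
    rw [List.flatMap_assoc]
    apply List.flatMap_congr
    intro a ha
    rw [PySem.List.mem_pyRange_one] at ha
    rw [List.flatMap_map]
    apply List.flatMap_congr
    intro b hb
    rw [PySem.List.mem_pyRange_one] at hb
    show (if pvF (ell + ellbar - 2 * j - a - b, j, a, b) (pvQuads ell ellbar) != 0
        then [(ell + ellbar - 2 * j - a - b, j, a, b,
               pvF (ell + ellbar - 2 * j - a - b, j, a, b) (pvQuads ell ellbar))] else [])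
      = _
    rw [pv_sum_char ell ellbar j a b (by omega) (by omega) (by omega) (by omega) (by omega) (by omega)]
    rfl
  · have hnil : PySem.List.pyRange 0 (min ell ellbar + 1) = [] :=
      PySem.List.pyRange_one_eq_nil (by omega)
    unfold psi_d1_configs psi_d1_configs_alt
    rw [hnil]
    rfl
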